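-- pv_equiv track=rewrite | github.com/jjv7/SWE30009-A2-Scripts-Jayden-Kong | assignment2.py | split_alphabets
-- ===== SOURCE A (Python) =====
-- def split_alphabets(char_list):
--     lowercase_list = []
--     uppercase_list = []
--
--     for char in char_list:
--         if char.isalpha():
--             if char.isupper():
--                 uppercase_list.append(char)
--             elif char.islower():
--                 lowercase_list.append(char)
--
--     lowercase_list = sorted(lowercase_list)
--     uppercase_list = sorted(uppercase_list)
--
--     return lowercase_list, uppercase_list
-- ===== SOURCE B (Python) =====
-- def split_alphabets(char_list):
--     s = sorted(char_list)
--     lowercase_list = [c for c in s if c.isalpha() and c.islower()]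
--     uppercase_list = [c for c in s if c.isalpha() and c.isupper()]
--     return lowercase_list, uppercase_list
-- ===== Notes on version B (the rewrite author's own statement) =====
-- stated objective: alternative
-- what changed: B sorts the whole input once and then filters the sorted list into the lowercase and uppercase sublists (filtering preserves sortedness), instead of A's accumulate-into-two-lists loop followed by two separate sorts.
import Mathlib
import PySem

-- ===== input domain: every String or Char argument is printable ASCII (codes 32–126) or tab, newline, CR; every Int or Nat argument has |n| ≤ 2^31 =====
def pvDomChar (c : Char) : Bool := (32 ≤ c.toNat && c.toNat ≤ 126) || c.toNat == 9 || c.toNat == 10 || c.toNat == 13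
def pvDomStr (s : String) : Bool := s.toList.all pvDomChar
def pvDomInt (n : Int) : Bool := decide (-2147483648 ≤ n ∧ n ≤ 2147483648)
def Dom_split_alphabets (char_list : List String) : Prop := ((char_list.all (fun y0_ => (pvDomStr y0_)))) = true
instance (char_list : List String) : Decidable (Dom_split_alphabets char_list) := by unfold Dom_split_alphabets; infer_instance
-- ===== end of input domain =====

-- B sorts the input once and filters the sorted list into the two case sublists, instead of
-- A's accumulate-into-two-lists loop followed by two separate sorts (objective: alternative).

-- Python str.isupper / str.islower, hand-ported (PySem has only the char-level tests):
-- at least one cased character, and no cased character of the opposite case.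
-- Exact on ASCII (inside Dom_ the cased characters are exactly the letters).
def pyStrIsupper (s : String) : Bool :=
  s.toList.any (fun c => PySem.Chars.isupper c || PySem.Chars.islower c)
    && s.toList.all (fun c => !PySem.Chars.islower c)

def pyStrIslower (s : String) : Bool :=
  s.toList.any (fun c => PySem.Chars.isupper c || PySem.Chars.islower c)
    && s.toList.all (fun c => !PySem.Chars.isupper c)

-- ===== PORT A =====
-- the body of A's for-loop (one step: classify one string into the two accumulators)
def aStep (acc : List String × List String) (char : String) : List String × List String :=
  if PySem.Str.strIsalpha char then
    if pyStrIsupper char then (acc.1, acc.2 ++ [char])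
    else if pyStrIslower char then (acc.1 ++ [char], acc.2)
    else acc
  else acc

def split_alphabets (char_list : List String) : List String × List String :=
  let pair := char_list.foldl aStep ([], [])
  (PySem.List.sorted pair.1 (fun x => x) false, PySem.List.sorted pair.2 (fun x => x) false)

-- ===== PORT B =====
def split_alphabets_alt (char_list : List String) : List String × List String :=
  let s := PySem.List.sorted char_list (fun x => x) false
  (s.filter (fun c => PySem.Str.strIsalpha c && pyStrIslower c),
   s.filter (fun c => PySem.Str.strIsalpha c && pyStrIsupper c))

-- ===== PRECONDITION & SPEC =====
def Spec_split_alphabets (char_list : List String) (out : List String × List String) : Prop := out = split_alphabets_alt char_list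
instance (char_list : List String) (out : List String × List String) : Decidable (Spec_split_alphabets char_list out) := by unfold Spec_split_alphabets; infer_instance

-- ===== CLAIM (what is proved, stated in full; the proofs are below) =====
def Claim_equal_split_alphabets : Prop := ∀ (char_list : List String), Dom_split_alphabets char_list → Spec_split_alphabets char_list (split_alphabets char_list)

-- ===== LEMMAS AND PROOFS =====

-- a string that is islower cannot be isupper (Python-general: islower demands a cased char
-- and no uppercase one; isupper demands no lowercase cased char)
theorem islower_not_isupper (s : String) (h : pyStrIslower s = true) : pyStrIsupper s = false := by
  by_contra hne
  have ht : pyStrIsupper s = true := by revert hne; cases pyStrIsupper s <;> simp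
  unfold pyStrIslower at h
  unfold pyStrIsupper at ht
  simp only [Bool.and_eq_true, List.any_eq_true, List.all_eq_true] at h ht
  obtain ⟨⟨c, hc, hcase⟩, hall⟩ := h
  have h1 := hall c hc
  have h2 := ht.2 c hc
  rcases Bool.or_eq_true_iff.mp hcase with hu | hl
  · simp [hu] at h1
  · simp [hl] at h2

-- A's loop produces exactly the two filtered sublists (in input order)
theorem aLoop_filter (char_list : List String) (acc : List String × List String) :
    char_list.foldl aStep acc
    = (acc.1 ++ char_list.filter (fun c => PySem.Str.strIsalpha c && pyStrIslower c),
       acc.2 ++ char_list.filter (fun c => PySem.Str.strIsalpha c && pyStrIsupper c)) := by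
  induction char_list generalizing acc with
  | nil => simp
  | cons x xs ih =>
    rw [List.foldl_cons, List.filter_cons, List.filter_cons, ih]
    by_cases ha : PySem.Str.strIsalpha x = true
    · have ha' : PySem.Chars.strIsalpha x.toList = true := by simpa using ha
      by_cases hu : pyStrIsupper x = true
      · have hl : pyStrIslower x = false := by
          by_contra h
          have := islower_not_isupper x (by revert h; cases pyStrIslower x <;> simp)
          simp [this] at hu
        have hstep : aStep acc x = (acc.1, acc.2 ++ [x]) := by rw [aStep, if_pos ha, if_pos hu]
        rw [hstep]
        simp [ha', hu, hl, List.append_assoc]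
      · by_cases hl : pyStrIslower x = true
        · have hstep : aStep acc x = (acc.1 ++ [x], acc.2) := by
            rw [aStep, if_pos ha, if_neg hu, if_pos hl]
          rw [hstep]
          simp [ha', hu, hl, List.append_assoc]
        · have hstep : aStep acc x = acc := by rw [aStep, if_pos ha, if_neg hu, if_neg hl]
          rw [hstep]
          simp [ha', hu, hl]
    · have ha' : PySem.Chars.strIsalpha x.toList = false := by
        revert ha; cases h : PySem.Chars.strIsalpha x.toList <;> simp [h]
      have hstep : aStep acc x = acc := by rw [aStep, if_neg ha]
      rw [hstep]
      simp [ha']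

-- sorting then filtering equals filtering then sorting (identity key)
theorem sorted_filter_comm (p : String → Bool) (xs : List String) :
    PySem.List.sorted (xs.filter p) (fun x => x) false
      = (PySem.List.sorted xs (fun x => x) false).filter p := by
  apply PySem.List.sorted_id_eq_of_perm_of_pairwise
  · exact (PySem.List.sorted_perm xs (fun x => x) false).filter p
  · exact List.Pairwise.sublist List.filter_sublist (PySem.List.sorted_pairwise xs (fun x => x))

-- ===== VERDICT (by name: the statement is the Claim_ definition above) =====
theorem split_alphabets_spec : Claim_equal_split_alphabets := by
  intro char_list _
  unfold Spec_split_alphabets split_alphabets split_alphabets_alt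
  simp only [aLoop_filter char_list ([], []), List.nil_append]
  rw [sorted_filter_comm, sorted_filter_comm]
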